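-- pv_equiv track=rewrite | github.com/tchelojc/ALMAfluxo | fluxomatematico/fluxomatematico.py | gerar_sequencia_reducao
-- ===== SOURCE A (Python) =====
-- def reduzir_teosoficamente(n):
--     """
--     Redução teosófica: soma dos dígitos até um único dígito (1-9).
--     Funciona com números inteiros ou float, removendo pontos e sinais.
--     """
--     try:
--         # Converte para string e remove caracteres não numéricos
--         str_num = str(n).replace('.', '').replace('-', '')
--         # Se for notação científica, simplifica
--         if 'e' in str_num.lower():
--             n_float = float(n)
--             str_num = f"{n_float:.0f}".replace('.', '')
--         while len(str_num) > 1: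
--             str_num = str(sum(int(d) for d in str_num if d.isdigit()))
--         return int(str_num)
--     except Exception:
--         return 0
--
-- def gerar_sequencia_reducao(iteracoes=100):
--     """Gera sequência de dobramento com redução teosófica (1,2,4,8,7,5...)"""
--     sequencia = [1]
--     resultados = []
--     for _ in range(iteracoes):
--         proximo = sequencia[-1] * 2
--         reduzido = reduzir_teosoficamente(proximo)
--         resultados.append((sequencia[-1], proximo, reduzido))
--         sequencia.append(reduzido)
--     return resultados
-- ===== SOURCE B (Python) =====
-- _CYCLE = [1, 2, 4, 8, 7, 5]  # period-6 cycle of the theosophically reduced doubling sequence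
--
-- def gerar_sequencia_reducao(iteracoes=100):
--     """Gera sequência de dobramento com redução teosófica (1,2,4,8,7,5...)"""
--     C = _CYCLE
--     return [(C[i % 6], C[i % 6] * 2, C[(i + 1) % 6]) for i in range(iteracoes)]
-- ===== Notes on version B (the rewrite author's own statement) =====
-- stated objective: faster
-- what changed: Replaces the growing `sequencia` list and the per-step string-based digit-sum reduction with a precomputed period-6 cycle [1,2,4,8,7,5] read off by modular index lookup.
import Mathlib
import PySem

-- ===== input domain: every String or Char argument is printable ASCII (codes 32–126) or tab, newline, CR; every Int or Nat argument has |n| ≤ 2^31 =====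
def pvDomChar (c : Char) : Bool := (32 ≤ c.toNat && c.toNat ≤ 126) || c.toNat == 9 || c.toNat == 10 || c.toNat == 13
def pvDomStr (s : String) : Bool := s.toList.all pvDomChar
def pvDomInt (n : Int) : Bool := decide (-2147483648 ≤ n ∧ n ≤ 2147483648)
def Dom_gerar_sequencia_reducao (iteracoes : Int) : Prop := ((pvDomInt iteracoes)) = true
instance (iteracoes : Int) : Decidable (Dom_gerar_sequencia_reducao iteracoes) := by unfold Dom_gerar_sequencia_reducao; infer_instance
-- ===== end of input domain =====

-- B replaces A's growing sequence list and per-step string digit-sum reduction by a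
-- precomputed period-6 cycle [1,2,4,8,7,5] read off by modular index lookup (objective: faster).

-- ===== PORT A =====
-- the `while len(str_num) > 1` loop of reduzir_teosoficamente, with fuel; the digit sum
-- `sum(int(d) for d in str_num if d.isdigit())` is ported per digit char as (c.toNat - 48),
-- exact for ASCII digit chars (the only chars Python's int(d) sees here)
def pvRedLoop : Nat → List Char → List Char
  | 0, cs => cs
  | fuel + 1, cs =>
    if cs.length > 1 then
      pvRedLoop fuel (PySem.Int.toChars
        (((cs.filter PySem.Chars.isdigit).map (fun c => (c.toNat : Int) - 48)).sum))
    else cs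

-- port of reduzir_teosoficamente for an Int argument; str(n) never contains 'e', so the
-- scientific-notation branch is unreachable and omitted. fuel n.natAbs+1 always suffices
-- (the represented value strictly decreases each pass while the string is multi-char).
def reduzir_teosoficamente (n : Int) : Int :=
  let str_num := PySem.Chars.replace (PySem.Chars.replace (PySem.Int.toChars n) ['.'] []) ['-'] []
  let final := pvRedLoop (n.natAbs + 1) str_num
  (PySem.Int.ofChars? final).getD 0   -- int(str_num); except Exception → 0

-- one loop iteration of A (the index is ignored, as Python's `_`);
-- sequencia[-1]: the list is never empty, so .getD 0 is exact
def pvStep (st : List Int × List (Int × Int × Int)) (_ : Int) :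
    List Int × List (Int × Int × Int) :=
  let last := (PySem.List.pyGet? st.1 (-1)).getD 0
  let proximo := last * 2
  let reduzido := reduzir_teosoficamente proximo
  (st.1 ++ [reduzido], st.2 ++ [(last, proximo, reduzido)])

def gerar_sequencia_reducao (iteracoes : Int) : List (Int × Int × Int) :=
  ((PySem.List.pyRange 0 iteracoes 1).foldl pvStep ([1], [])).2

-- ===== PORT B =====
def pvCycle : List Int := [1, 2, 4, 8, 7, 5]

-- range(iteracoes) is empty for iteracoes ≤ 0, hence .toNat
def gerar_sequencia_reducao_alt (iteracoes : Int) : List (Int × Int × Int) :=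
  (List.range iteracoes.toNat).map (fun i =>
    (pvCycle.getD (i % 6) 0, pvCycle.getD (i % 6) 0 * 2, pvCycle.getD ((i + 1) % 6) 0))

-- ===== PRECONDITION & SPEC =====
def Spec_gerar_sequencia_reducao (iteracoes : Int) (out : List (Int × Int × Int)) : Prop := out = gerar_sequencia_reducao_alt iteracoes
instance (iteracoes : Int) (out : List (Int × Int × Int)) : Decidable (Spec_gerar_sequencia_reducao iteracoes out) := by unfold Spec_gerar_sequencia_reducao; infer_instance

-- ===== CLAIM (what is proved, stated in full; the proofs are below) =====
def Claim_equal_gerar_sequencia_reducao : Prop := ∀ (iteracoes : Int), Dom_gerar_sequencia_reducao iteracoes → Spec_gerar_sequencia_reducao iteracoes (gerar_sequencia_reducao iteracoes)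

-- ===== LEMMAS AND PROOFS =====

-- B's per-index tuple
def pvF (i : Nat) : Int × Int × Int :=
  (pvCycle.getD (i % 6) 0, pvCycle.getD (i % 6) 0 * 2, pvCycle.getD ((i + 1) % 6) 0)

-- the fold body ignores its second argument, so the fold is an iterate of the step
lemma pv_foldl_eq_iterate (l : List Int) (s : List Int × List (Int × Int × Int)) :
    l.foldl pvStep s = (fun t => pvStep t 0)^[l.length] s := by
  induction l generalizing s with
  | nil => rfl
  | cons a l ih =>
    simp only [List.foldl_cons, List.length_cons, ih]
    rw [Function.iterate_succ_apply]
    rfl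

lemma pv_red_cycle (k : Nat) (hk : k < 6) :
    reduzir_teosoficamente (2 * pvCycle.getD (k % 6) 0) = pvCycle.getD ((k + 1) % 6) 0 := by
  interval_cases k <;> decide

-- loop invariant: after n iterations the sequence ends in pvCycle[n % 6]
-- and the results are B's first n tuples
lemma pv_invariant (n : Nat) :
    ∃ pre, (fun t => pvStep t 0)^[n] (([1], []) : List Int × List (Int × Int × Int)) =
      (pre ++ [pvCycle.getD (n % 6) 0], (List.range n).map pvF) := by
  induction n with
  | zero => exact ⟨[], rfl⟩
  | succ n ih =>
    obtain ⟨pre, hpre⟩ := ih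
    refine ⟨pre ++ [pvCycle.getD (n % 6) 0], ?_⟩
    rw [Function.iterate_succ_apply', hpre]
    have hm : (n + 1) % 6 = (n % 6 + 1) % 6 := by omega
    have hred := pv_red_cycle (n % 6) (Nat.mod_lt _ (by norm_num))
    rw [Nat.mod_mod_of_dvd n (by norm_num)] at hred
    rw [hm]
    simp only [pvStep, PySem.List.pyGet?_neg_one_append_singleton, Option.getD_some,
      List.range_succ, List.map_append, List.map_cons, List.map_nil, List.append_assoc]
    rw [mul_comm (pvCycle.getD (n % 6) 0) 2, hred]
    simp only [pvF, hm]
    rw [mul_comm]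

-- ===== VERDICT (by name: the statement is the Claim_ definition above) =====
theorem gerar_sequencia_reducao_spec : Claim_equal_gerar_sequencia_reducao := by
  intro it _
  unfold Spec_gerar_sequencia_reducao gerar_sequencia_reducao gerar_sequencia_reducao_alt
  rw [pv_foldl_eq_iterate]
  obtain ⟨pre, hpre⟩ := pv_invariant (PySem.List.pyRange 0 it 1).length
  rw [hpre]
  simp [PySem.List.length_pyRange_one, pvF]
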